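-- pv_equiv track=rewrite | github.com/luigi1256/stronpy | Relay_list_battleship.py | where_is
-- ===== SOURCE A (Python) =====
-- def where_is(wss,Wu):
--     i=0
--     s=0
--     l=[]
--     while i<len(Wu):
--         j=0
--         while j<len(Wu[i]):
--             if wss == Wu[i][j]:
--                 s=s+1
--                 l.append(i)
--             j=j+1
--
--         i=i+1
--     return s,l
-- ===== SOURCE B (Python) =====
-- def where_is(wss, Wu):
--     # Build a query-independent inverted index value -> list of row indices
--     # (one entry per occurrence), then answer with a single dictionary lookup.
--     idx = {}
--     for i, row in enumerate(Wu):
--         for x in row: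
--             idx.setdefault(x, []).append(i)
--     l = idx.get(wss, [])
--     return len(l), l
-- ===== Notes on version B (the rewrite author's own statement) =====
-- stated objective: alternative
-- what changed: A compares every cell against wss in an index-driven double while loop, incrementing a counter and appending row indices; B never compares cells against wss inside the loop: it builds a query-independent inverted index mapping each value to its list of row indices, then answers with one dictionary lookup and a len().
import Mathlib
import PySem

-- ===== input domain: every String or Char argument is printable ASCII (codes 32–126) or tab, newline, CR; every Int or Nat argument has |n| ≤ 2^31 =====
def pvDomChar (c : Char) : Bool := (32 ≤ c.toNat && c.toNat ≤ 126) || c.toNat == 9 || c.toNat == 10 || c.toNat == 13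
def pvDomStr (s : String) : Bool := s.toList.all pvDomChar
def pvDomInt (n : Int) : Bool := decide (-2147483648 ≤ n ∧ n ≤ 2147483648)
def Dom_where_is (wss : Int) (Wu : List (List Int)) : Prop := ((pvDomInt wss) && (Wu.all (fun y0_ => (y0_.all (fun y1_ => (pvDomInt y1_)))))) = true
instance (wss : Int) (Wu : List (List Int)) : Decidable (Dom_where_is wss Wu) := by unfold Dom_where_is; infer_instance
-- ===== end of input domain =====

-- B replaces A's per-cell comparison loop by a query-independent inverted index (value -> row indices) consulted once (alternative, same cost).
-- ===== PORT A =====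
-- inner while loop: walks the cells of row one by one, testing wss and appending i per match
def pvRowLoopA (wss i : Int) (row : List Int) (s : Int) (l : List Int) : Int × List Int :=
  match row with
  | [] => (s, l)
  | x :: xs => if wss == x then pvRowLoopA wss i xs (s + 1) (l ++ [i]) else pvRowLoopA wss i xs s l

-- outer while loop over the rows, carrying the index i and the state s, l
def pvOuterLoopA (wss : Int) (rows : List (List Int)) (i s : Int) (l : List Int) : Int × List Int :=
  match rows with
  | [] => (s, l)
  | r :: rs =>
    let p := pvRowLoopA wss i r s l
    pvOuterLoopA wss rs (i + 1) p.1 p.2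

def where_is (wss : Int) (Wu : List (List Int)) : Int × List Int :=
  pvOuterLoopA wss Wu 0 0 []

-- ===== PORT B =====
-- inner for loop: idx.setdefault(x, []).append(i)  ==  idx[x] = idx.get(x, []) + [i]  (Dict.modify)
def pvRowIdxB (i : Int) (row : List Int) (d : PySem.Dict Int (List Int)) : PySem.Dict Int (List Int) :=
  match row with
  | [] => d
  | x :: xs => pvRowIdxB i xs (d.modify x [] (· ++ [i]))

-- outer for loop with enumerate: builds the full inverted index
def pvBuildIdxB (i : Int) (rows : List (List Int)) (d : PySem.Dict Int (List Int)) : PySem.Dict Int (List Int) :=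
  match rows with
  | [] => d
  | r :: rs => pvBuildIdxB (i + 1) rs (pvRowIdxB i r d)

def where_is_alt (wss : Int) (Wu : List (List Int)) : Int × List Int :=
  let l := (pvBuildIdxB 0 Wu PySem.Dict.empty).getD wss []
  ((l.length : Int), l)

-- ===== PRECONDITION & SPEC =====
def Spec_where_is (wss : Int) (Wu : List (List Int)) (out : Int × List Int) : Prop := out = where_is_alt wss Wu
instance (wss : Int) (Wu : List (List Int)) (out : Int × List Int) : Decidable (Spec_where_is wss Wu out) := by unfold Spec_where_is; infer_instance

-- ===== CLAIM (what is proved, stated in full; the proofs are below) =====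
def Claim_equal_where_is : Prop := ∀ (wss : Int) (Wu : List (List Int)), Dom_where_is wss Wu → Spec_where_is wss Wu (where_is wss Wu)

-- ===== LEMMAS AND PROOFS =====
-- proof-only characterisation: the row indices of the matches of wss, rows numbered from i
def pvSpecIdx (wss i : Int) (rows : List (List Int)) : List Int :=
  match rows with
  | [] => []
  | r :: rs => List.replicate (r.count wss) i ++ pvSpecIdx wss (i + 1) rs

theorem rowLoopA_eq (wss i : Int) (row : List Int) (s : Int) (l : List Int) :
    pvRowLoopA wss i row s l = (s + row.count wss, l ++ List.replicate (row.count wss) i) := by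
  induction row generalizing s l with
  | nil => simp [pvRowLoopA]
  | cons x xs ih =>
    by_cases h : wss = x
    · subst h
      simp only [pvRowLoopA, beq_self_eq_true, if_true, ih, List.count_cons_self,
        List.replicate_succ, List.append_assoc, List.singleton_append, Prod.mk.injEq]
      exact ⟨by push_cast; ring, trivial⟩
    · simp [pvRowLoopA, h, ih, Ne.symm h]

theorem outerLoopA_eq (wss : Int) (rows : List (List Int)) (i s : Int) (l : List Int) :
    pvOuterLoopA wss rows i s l = (s + (pvSpecIdx wss i rows).length, l ++ pvSpecIdx wss i rows) := by
  induction rows generalizing i s l with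
  | nil => simp [pvOuterLoopA, pvSpecIdx]
  | cons r rs ih =>
    simp only [pvOuterLoopA, rowLoopA_eq, ih, pvSpecIdx, List.length_append,
      List.length_replicate, List.append_assoc, Prod.mk.injEq]
    exact ⟨by push_cast; ring, trivial⟩

theorem rowIdxB_getD (wss i : Int) (row : List Int) (d : PySem.Dict Int (List Int)) :
    (pvRowIdxB i row d).getD wss [] = d.getD wss [] ++ List.replicate (row.count wss) i := by
  induction row generalizing d with
  | nil => simp [pvRowIdxB]
  | cons x xs ih =>
    by_cases h : wss = x
    · subst h
      simp [pvRowIdxB, ih, PySem.Dict.getD_modify_self, List.replicate_succ]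
    · simp [pvRowIdxB, ih, PySem.Dict.getD_modify_of_ne (hne := h), Ne.symm h]

theorem buildIdxB_getD (wss i : Int) (rows : List (List Int)) (d : PySem.Dict Int (List Int)) :
    (pvBuildIdxB i rows d).getD wss [] = d.getD wss [] ++ pvSpecIdx wss i rows := by
  induction rows generalizing i d with
  | nil => simp [pvBuildIdxB, pvSpecIdx]
  | cons r rs ih => simp [pvBuildIdxB, pvSpecIdx, ih, rowIdxB_getD]

-- ===== VERDICT (by name: the statement is the Claim_ definition above) =====
theorem where_is_spec : Claim_equal_where_is := by
  intro wss Wu _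
  show where_is wss Wu = where_is_alt wss Wu
  simp [where_is, where_is_alt, outerLoopA_eq, buildIdxB_getD, PySem.Dict.getD_empty]
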